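-- pv_equiv track=rewrite | github.com/TallFurryMan/pixinsight-rowbandingcompensation | doc/tools/generate_assets.py | text_size
-- ===== SOURCE A (Python) =====
-- FONT = {
--     " ": ["00000", "00000", "00000", "00000", "00000", "00000", "00000"],
--     "A": ["01110", "10001", "10001", "11111", "10001", "10001", "10001"],
--     "B": ["11110", "10001", "10001", "11110", "10001", "10001", "11110"],
--     "C": ["01110", "10001", "10000", "10000", "10000", "10001", "01110"],
--     "D": ["11110", "10001", "10001", "10001", "10001", "10001", "11110"],
--     "E": ["11111", "10000", "10000", "11110", "10000", "10000", "11111"],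
--     "F": ["11111", "10000", "10000", "11110", "10000", "10000", "10000"],
--     "G": ["01110", "10001", "10000", "10111", "10001", "10001", "01110"],
--     "H": ["10001", "10001", "10001", "11111", "10001", "10001", "10001"],
--     "I": ["11111", "00100", "00100", "00100", "00100", "00100", "11111"],
--     "J": ["00111", "00010", "00010", "00010", "00010", "10010", "01100"],
--     "K": ["10001", "10010", "10100", "11000", "10100", "10010", "10001"],
--     "L": ["10000", "10000", "10000", "10000", "10000", "10000", "11111"],
--     "M": ["10001", "11011", "10101", "10101", "10001", "10001", "10001"],
--     "N": ["10001", "11001", "10101", "10011", "10001", "10001", "10001"],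
--     "O": ["01110", "10001", "10001", "10001", "10001", "10001", "01110"],
--     "P": ["11110", "10001", "10001", "11110", "10000", "10000", "10000"],
--     "Q": ["01110", "10001", "10001", "10001", "10101", "10010", "01101"],
--     "R": ["11110", "10001", "10001", "11110", "10100", "10010", "10001"],
--     "S": ["01111", "10000", "10000", "01110", "00001", "00001", "11110"],
--     "T": ["11111", "00100", "00100", "00100", "00100", "00100", "00100"],
--     "U": ["10001", "10001", "10001", "10001", "10001", "10001", "01110"],
--     "V": ["10001", "10001", "10001", "10001", "10001", "01010", "00100"],
--     "W": ["10001", "10001", "10001", "10101", "10101", "10101", "01010"],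
--     "X": ["10001", "10001", "01010", "00100", "01010", "10001", "10001"],
--     "Y": ["10001", "10001", "01010", "00100", "00100", "00100", "00100"],
--     "Z": ["11111", "00001", "00010", "00100", "01000", "10000", "11111"],
--     "0": ["01110", "10001", "10011", "10101", "11001", "10001", "01110"],
--     "1": ["00100", "01100", "00100", "00100", "00100", "00100", "01110"],
--     "2": ["01110", "10001", "00001", "00010", "00100", "01000", "11111"],
--     "3": ["11110", "00001", "00001", "01110", "00001", "00001", "11110"],
--     "4": ["00010", "00110", "01010", "10010", "11111", "00010", "00010"],
--     "5": ["11111", "10000", "10000", "11110", "00001", "00001", "11110"],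
--     "6": ["01110", "10000", "10000", "11110", "10001", "10001", "01110"],
--     "7": ["11111", "00001", "00010", "00100", "01000", "01000", "01000"],
--     "8": ["01110", "10001", "10001", "01110", "10001", "10001", "01110"],
--     "9": ["01110", "10001", "10001", "01111", "00001", "00001", "01110"],
--     "_": ["00000", "00000", "00000", "00000", "00000", "00000", "11111"],
--     "(": ["00010", "00100", "01000", "01000", "01000", "00100", "00010"],
--     ")": ["01000", "00100", "00010", "00010", "00010", "00100", "01000"],
--     "[": ["01110", "01000", "01000", "01000", "01000", "01000", "01110"],
--     "]": ["01110", "00010", "00010", "00010", "00010", "00010", "01110"],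
--     "+": ["00000", "00100", "00100", "11111", "00100", "00100", "00000"],
--     "-": ["00000", "00000", "00000", "11111", "00000", "00000", "00000"],
--     "=": ["00000", "11111", "00000", "11111", "00000", "00000", "00000"],
--     ",": ["00000", "00000", "00000", "00000", "00110", "00100", "01000"],
--     ".": ["00000", "00000", "00000", "00000", "00000", "00110", "00110"],
--     "*": ["00000", "10001", "01010", "00100", "01010", "10001", "00000"],
--     "/": ["00001", "00010", "00100", "01000", "10000", "00000", "00000"],
--     ":": ["00000", "00110", "00110", "00000", "00110", "00110", "00000"],
--     "%": ["11001", "11010", "00100", "01000", "10110", "00110", "00000"],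
-- }
--
-- def text_size(text, scale=4, spacing=1):
--     width = 0
--     for ch in text:
--         glyph = FONT.get(ch, FONT[" "])
--         width += (len(glyph[0]) + spacing) * scale
--     if text:
--         width -= spacing * scale
--     height = len(next(iter(FONT.values()))) * scale
--     return width, height
-- ===== SOURCE B (Python) =====
-- def text_size(text, scale=4, spacing=1):
--     # Closed form: every glyph is 5 px wide and 7 px tall, so no per-character loop is needed.
--     height = 7 * scale
--     if not text:
--         return 0, height
--     return len(text) * (5 + spacing) * scale - spacing * scale, height
-- ===== Notes on version B (the rewrite author's own statement) =====
-- stated objective: faster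
-- what changed: Replaced the per-character loop over FONT glyph lookups with a closed-form formula using the fixed 5x7 glyph size: width = len(text)*(5+spacing)*scale - spacing*scale (0 for empty text), height = 7*scale.
import Mathlib
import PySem

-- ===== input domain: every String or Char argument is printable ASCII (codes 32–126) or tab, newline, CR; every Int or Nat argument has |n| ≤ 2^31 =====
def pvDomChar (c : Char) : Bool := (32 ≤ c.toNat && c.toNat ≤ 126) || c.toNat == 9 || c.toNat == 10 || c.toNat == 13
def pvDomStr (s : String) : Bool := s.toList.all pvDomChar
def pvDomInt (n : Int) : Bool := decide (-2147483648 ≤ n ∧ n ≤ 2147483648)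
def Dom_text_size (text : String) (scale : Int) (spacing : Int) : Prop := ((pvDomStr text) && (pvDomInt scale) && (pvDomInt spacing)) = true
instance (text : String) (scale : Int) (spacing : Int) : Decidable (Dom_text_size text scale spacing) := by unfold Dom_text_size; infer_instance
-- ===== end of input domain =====

set_option maxRecDepth 4000


-- B replaces A's per-character glyph-lookup loop with a closed-form width/height formula (asymptotically faster).

-- ===== PORT A =====
def pvFONT : PySem.Dict Char (List String) := PySem.Dict.ofList [
  (' ', ["00000", "00000", "00000", "00000", "00000", "00000", "00000"]),
  ('A', ["01110", "10001", "10001", "11111", "10001", "10001", "10001"]),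
  ('B', ["11110", "10001", "10001", "11110", "10001", "10001", "11110"]),
  ('C', ["01110", "10001", "10000", "10000", "10000", "10001", "01110"]),
  ('D', ["11110", "10001", "10001", "10001", "10001", "10001", "11110"]),
  ('E', ["11111", "10000", "10000", "11110", "10000", "10000", "11111"]),
  ('F', ["11111", "10000", "10000", "11110", "10000", "10000", "10000"]),
  ('G', ["01110", "10001", "10000", "10111", "10001", "10001", "01110"]),
  ('H', ["10001", "10001", "10001", "11111", "10001", "10001", "10001"]),
  ('I', ["11111", "00100", "00100", "00100", "00100", "00100", "11111"]),
  ('J', ["00111", "00010", "00010", "00010", "00010", "10010", "01100"]),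
  ('K', ["10001", "10010", "10100", "11000", "10100", "10010", "10001"]),
  ('L', ["10000", "10000", "10000", "10000", "10000", "10000", "11111"]),
  ('M', ["10001", "11011", "10101", "10101", "10001", "10001", "10001"]),
  ('N', ["10001", "11001", "10101", "10011", "10001", "10001", "10001"]),
  ('O', ["01110", "10001", "10001", "10001", "10001", "10001", "01110"]),
  ('P', ["11110", "10001", "10001", "11110", "10000", "10000", "10000"]),
  ('Q', ["01110", "10001", "10001", "10001", "10101", "10010", "01101"]),
  ('R', ["11110", "10001", "10001", "11110", "10100", "10010", "10001"]),
  ('S', ["01111", "10000", "10000", "01110", "00001", "00001", "11110"]),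
  ('T', ["11111", "00100", "00100", "00100", "00100", "00100", "00100"]),
  ('U', ["10001", "10001", "10001", "10001", "10001", "10001", "01110"]),
  ('V', ["10001", "10001", "10001", "10001", "10001", "01010", "00100"]),
  ('W', ["10001", "10001", "10001", "10101", "10101", "10101", "01010"]),
  ('X', ["10001", "10001", "01010", "00100", "01010", "10001", "10001"]),
  ('Y', ["10001", "10001", "01010", "00100", "00100", "00100", "00100"]),
  ('Z', ["11111", "00001", "00010", "00100", "01000", "10000", "11111"]),
  ('0', ["01110", "10001", "10011", "10101", "11001", "10001", "01110"]),
  ('1', ["00100", "01100", "00100", "00100", "00100", "00100", "01110"]),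
  ('2', ["01110", "10001", "00001", "00010", "00100", "01000", "11111"]),
  ('3', ["11110", "00001", "00001", "01110", "00001", "00001", "11110"]),
  ('4', ["00010", "00110", "01010", "10010", "11111", "00010", "00010"]),
  ('5', ["11111", "10000", "10000", "11110", "00001", "00001", "11110"]),
  ('6', ["01110", "10000", "10000", "11110", "10001", "10001", "01110"]),
  ('7', ["11111", "00001", "00010", "00100", "01000", "01000", "01000"]),
  ('8', ["01110", "10001", "10001", "01110", "10001", "10001", "01110"]),
  ('9', ["01110", "10001", "10001", "01111", "00001", "00001", "01110"]),
  ('_', ["00000", "00000", "00000", "00000", "00000", "00000", "11111"]),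
  ('(', ["00010", "00100", "01000", "01000", "01000", "00100", "00010"]),
  (')', ["01000", "00100", "00010", "00010", "00010", "00100", "01000"]),
  ('[', ["01110", "01000", "01000", "01000", "01000", "01000", "01110"]),
  (']', ["01110", "00010", "00010", "00010", "00010", "00010", "01110"]),
  ('+', ["00000", "00100", "00100", "11111", "00100", "00100", "00000"]),
  ('-', ["00000", "00000", "00000", "11111", "00000", "00000", "00000"]),
  ('=', ["00000", "11111", "00000", "11111", "00000", "00000", "00000"]),
  (',', ["00000", "00000", "00000", "00000", "00110", "00100", "01000"]),
  ('.', ["00000", "00000", "00000", "00000", "00000", "00110", "00110"]),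
  ('*', ["00000", "10001", "01010", "00100", "01010", "10001", "00000"]),
  ('/', ["00001", "00010", "00100", "01000", "10000", "00000", "00000"]),
  (':', ["00000", "00110", "00110", "00000", "00110", "00110", "00000"]),
  ('%', ["11001", "11010", "00100", "01000", "10110", "00110", "00000"])]


-- Port of A: fold over the characters accumulating width, exactly as the Python loop does.
-- glyph[0] is ported as (pyGet? glyph 0).getD "" — every FONT value is a nonempty list, so the
-- default is never used (Python never raises here).
def text_size (text : String) (scale : Int) (spacing : Int) : List Int :=
  let width : Int := text.toList.foldl
    (fun w ch =>
      let glyph := pvFONT.getD ch (pvFONT.getD ' ' [])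
      w + ((PySem.Str.len ((PySem.List.pyGet? glyph 0).getD "")) + spacing) * scale) 0
  let width : Int := if text.toList = [] then width else width - spacing * scale
  let height : Int := ((pvFONT.values.headD []).length : Int) * scale
  [width, height]

-- ===== PORT B =====
def text_size_alt (text : String) (scale : Int) (spacing : Int) : List Int :=
  let height : Int := 7 * scale
  if text.toList = [] then [0, height]
  else [(PySem.Str.len text) * (5 + spacing) * scale - spacing * scale, height]

-- ===== PRECONDITION & SPEC =====
def Spec_text_size (text : String) (scale : Int) (spacing : Int) (out : List Int) : Prop := out = text_size_alt text scale spacing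
instance (text : String) (scale : Int) (spacing : Int) (out : List Int) : Decidable (Spec_text_size text scale spacing out) := by unfold Spec_text_size; infer_instance

-- ===== CLAIM (what is proved, stated in full; the proofs are below) =====
def Claim_equal_text_size : Prop := ∀ (text : String) (scale : Int) (spacing : Int), Dom_text_size text scale spacing → Spec_text_size text scale spacing (text_size text scale spacing)

-- ===== LEMMAS AND PROOFS =====

-- A successful dict lookup yields a stored value.
theorem pv_get?_mem_values {κ ν : Type} [BEq κ] (d : PySem.Dict κ ν) (k : κ) (v : ν)
    (h : d.get? k = some v) : v ∈ d.values := by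
  unfold PySem.Dict.get? at h
  obtain ⟨p, hp, hv⟩ := Option.map_eq_some_iff.mp h
  exact hv ▸ List.mem_map_of_mem (List.mem_of_find?_eq_some hp)

-- A dict lookup with default returns either a stored value or the default.
theorem pv_getD_mem_or {κ ν : Type} [BEq κ] (d : PySem.Dict κ ν) (k : κ) (dflt : ν) :
    d.getD k dflt ∈ d.values ∨ d.getD k dflt = dflt := by
  rw [PySem.Dict.getD_eq_get?_getD]
  cases h : d.get? k with
  | none => exact Or.inr rfl
  | some v => exact Or.inl (pv_get?_mem_values d k v h)

-- Every stored FONT glyph has a first row of length 5 (checked over the 52 literal values).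
theorem pv_all_values :
    pvFONT.values.all (fun v => PySem.Str.len ((PySem.List.pyGet? v 0).getD "") == 5) = true := by
  decide

-- Hence every glyph A can pick (found or the " " default) has first-row length 5.
theorem pv_glyph_width (ch : Char) :
    PySem.Str.len ((PySem.List.pyGet? (pvFONT.getD ch (pvFONT.getD ' ' [])) 0).getD "") = 5 := by
  rcases pv_getD_mem_or pvFONT ch (pvFONT.getD ' ' []) with h | h
  · have h2 := List.all_eq_true.mp pv_all_values _ h
    simpa using h2
  · rw [h]; decide

-- A's width loop adds the same constant for every character.
theorem pv_fold_const (scale spacing : Int) (l : List Char) (a : Int) :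
    l.foldl (fun w ch =>
      let glyph := pvFONT.getD ch (pvFONT.getD ' ' [])
      w + ((PySem.Str.len ((PySem.List.pyGet? glyph 0).getD "")) + spacing) * scale) a
    = a + (l.length : Int) * ((5 + spacing) * scale) := by
  induction l generalizing a with
  | nil => simp
  | cons c cs ih =>
    rw [List.foldl_cons, ih]
    simp only [pv_glyph_width, List.length_cons]
    push_cast
    ring

-- The first FONT value has 7 rows.
theorem pv_height : (pvFONT.values.headD []).length = 7 := by decide

-- ===== VERDICT (by name: the statement is the Claim_ definition above) =====
theorem text_size_spec : Claim_equal_text_size := by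
  intro text scale spacing _
  unfold Spec_text_size text_size text_size_alt
  simp only [pv_fold_const, pv_height]
  rcases h : text.toList with _ | ⟨c, cs⟩
  · simp
  · simp [PySem.Str.len_eq, h]
    ring
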